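-- pv_equiv track=rewrite | github.com/IMUJason/Integrated-Facility-Activation-and-Routing | code/common.py | duplicate_customers
-- ===== SOURCE A (Python) =====
-- from typing import Dict, Iterable, List, Sequence, Tuple
--
-- def duplicate_customers(solution: Dict) -> List[int]:
--     seen = set()
--     duplicates = set()
--     for route in solution["routes"]:
--         for customer_id in route["customers"]:
--             if customer_id in seen:
--                 duplicates.add(customer_id)
--             seen.add(customer_id)
--     return sorted(duplicates)
-- ===== SOURCE B (Python) =====
-- def duplicate_customers(solution):
--     ids = sorted(cid for route in solution["routes"] for cid in route["customers"])
--     out = []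
--     for prev, cur in zip(ids, ids[1:]):
--         if prev == cur and (not out or out[-1] != cur):
--             out.append(cur)
--     return out
-- ===== Notes on version B (the rewrite author's own statement) =====
-- stated objective: alternative
-- what changed: Instead of in-scan duplicate detection with seen/duplicates sets plus a final sort, B flattens all customer ids, sorts them first, and then does one linear adjacent-pair scan (duplicates are adjacent in a sorted list), emitting each duplicated id once.
import Mathlib
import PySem

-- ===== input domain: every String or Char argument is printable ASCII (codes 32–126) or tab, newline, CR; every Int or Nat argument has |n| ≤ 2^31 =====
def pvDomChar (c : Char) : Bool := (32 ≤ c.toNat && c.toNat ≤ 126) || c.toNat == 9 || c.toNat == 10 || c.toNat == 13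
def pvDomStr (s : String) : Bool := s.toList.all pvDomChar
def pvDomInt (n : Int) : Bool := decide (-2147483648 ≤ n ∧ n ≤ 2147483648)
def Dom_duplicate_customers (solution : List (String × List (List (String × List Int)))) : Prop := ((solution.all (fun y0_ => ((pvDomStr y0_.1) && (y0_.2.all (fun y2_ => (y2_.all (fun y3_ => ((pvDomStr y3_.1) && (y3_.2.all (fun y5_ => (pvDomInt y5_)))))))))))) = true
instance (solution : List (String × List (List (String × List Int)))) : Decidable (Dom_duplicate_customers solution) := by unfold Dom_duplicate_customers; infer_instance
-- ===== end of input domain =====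

-- B flattens all customer ids, sorts them first, and emits duplicated ids by one
-- adjacent-pair scan (duplicates are adjacent in a sorted list) — no sets, no counting.

-- ===== PORT A =====
def duplicate_customers (solution : List (String × List (List (String × List Int)))) : List Int :=
  let routes := (PySem.Dict.get? (PySem.Dict.mk solution) "routes").getD []
  let st := routes.foldl
    (fun (st : PySem.Set Int × PySem.Set Int) route =>
      ((PySem.Dict.get? (PySem.Dict.mk route) "customers").getD []).foldl
        (fun (st : PySem.Set Int × PySem.Set Int) cid =>
          (PySem.Set.add st.1 cid,
           if PySem.Set.contains st.1 cid then PySem.Set.add st.2 cid else st.2))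
        st)
    (PySem.Set.empty, PySem.Set.empty)
  PySem.List.sorted st.2 (fun x => x) false

-- ===== PORT B =====
-- 'not out or out[-1] != cur' is ported as 'out.getLast? ≠ some cur' (exactly equivalent:
-- an empty list has getLast? = none).
def duplicate_customers_alt (solution : List (String × List (List (String × List Int)))) : List Int :=
  let routes := (PySem.Dict.get? (PySem.Dict.mk solution) "routes").getD []
  let ids := PySem.List.sorted
    (routes.flatMap (fun route => (PySem.Dict.get? (PySem.Dict.mk route) "customers").getD []))
    (fun x => x) false
  (ids.zip (PySem.List.slice ids (some 1) none)).foldl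
    (fun (out : List Int) p =>
      if p.1 = p.2 ∧ out.getLast? ≠ some p.2 then out ++ [p.2] else out) []

-- ===== PRECONDITION & SPEC =====
-- Pre_ excludes exactly the inputs where Python A raises KeyError: a missing "routes"
-- key, or a route dict missing its "customers" key.
def Pre_duplicate_customers (solution : List (String × List (List (String × List Int)))) : Prop :=
  (PySem.Dict.get? (PySem.Dict.mk solution) "routes").isSome = true ∧
  ∀ route ∈ ((PySem.Dict.get? (PySem.Dict.mk solution) "routes").getD []),
    (PySem.Dict.get? (PySem.Dict.mk route) "customers").isSome = true
instance (solution : List (String × List (List (String × List Int)))) : Decidable (Pre_duplicate_customers solution) := by unfold Pre_duplicate_customers; infer_instance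
def pvWitness_duplicate_customers : (List (String × List (List (String × List Int)))) :=
  [("routes", [[("customers", [1, 2, 1, 3])], [("customers", [3, 4])]])]

def Spec_duplicate_customers (solution : List (String × List (List (String × List Int)))) (out : List Int) : Prop := out = duplicate_customers_alt solution
instance (solution : List (String × List (List (String × List Int)))) (out : List Int) : Decidable (Spec_duplicate_customers solution out) := by unfold Spec_duplicate_customers; infer_instance

-- ===== CLAIM (what is proved, stated in full; the proofs are below) =====
def Claim_equal_duplicate_customers : Prop := ∀ (solution : List (String × List (List (String × List Int)))), Dom_duplicate_customers solution → Pre_duplicate_customers solution → Spec_duplicate_customers solution (duplicate_customers solution)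

-- ===== LEMMAS AND PROOFS =====

-- A's inner loop body, named for the proofs (the port's lambda is definitionally this).
def stepA (st : PySem.Set Int × PySem.Set Int) (cid : Int) : PySem.Set Int × PySem.Set Int :=
  (PySem.Set.add st.1 cid,
   if PySem.Set.contains st.1 cid then PySem.Set.add st.2 cid else st.2)

-- B's loop body, named for the proofs.
def stepB (out : List Int) (p : Int × Int) : List Int :=
  if p.1 = p.2 ∧ out.getLast? ≠ some p.2 then out ++ [p.2] else out

theorem foldl_foldl_eq_foldl_flatMap {α β γ : Type} (l : List α) (g : α → List β)
    (f : γ → β → γ) (init : γ) :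
    l.foldl (fun acc x => (g x).foldl f acc) init = (l.flatMap g).foldl f init := by
  induction l generalizing init with
  | nil => simp
  | cons a t ih => simp [List.flatMap_cons, List.foldl_append, ih]

theorem stepA_invariant (L : List Int) (s d : PySem.Set Int) (hd : d.Nodup) :
    (L.foldl stepA (s, d)).2.Nodup ∧
    ∀ x : Int, x ∈ (L.foldl stepA (s, d)).2 ↔
      x ∈ d ∨ (x ∈ s ∧ x ∈ L) ∨ 2 ≤ L.count x := by
  induction L generalizing s d with
  | nil => simp [hd]
  | cons c t ih =>
    have hd' : (if PySem.Set.contains s c then PySem.Set.add d c else d).Nodup := by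
      split
      · exact PySem.Set.nodup_add _ _ hd
      · exact hd
    obtain ⟨hnd, hmem⟩ := ih (PySem.Set.add s c) _ hd'
    refine ⟨by simpa [stepA] using hnd, fun x => ?_⟩
    rw [show (c :: t).foldl stepA (s, d) = t.foldl stepA (stepA (s, d) c) from rfl,
        show stepA (s, d) c =
          (PySem.Set.add s c, if PySem.Set.contains s c then PySem.Set.add d c else d) from rfl]
    rw [hmem x]
    have hcount : (c :: t).count x = t.count x + (if c = x then 1 else 0) := by
      simp [List.count_cons]
    have hxc' : ∀ (h : ¬ x = c), ¬ c = x := fun h h2 => h h2.symm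
    by_cases hxc : x = c
    · subst hxc
      by_cases hsc : x ∈ s
      · simp [PySem.Set.mem_add, hsc, hcount]
      · by_cases hxt : x ∈ t
        · have hpos : 0 < t.count x := List.count_pos_iff.mpr hxt
          simp [hsc, hcount, hxt]
        · have hz : t.count x = 0 := List.count_eq_zero.mpr hxt
          simp [hsc, hcount, hxt, hz]
    · by_cases hsc : c ∈ s
      · simp [PySem.Set.mem_add, hsc, hxc, hxc' hxc, hcount]
      · simp [hsc, hxc, hxc' hxc, hcount]

-- In a strictly increasing list whose elements are all ≤ b, an occurrence of b is the last element.
theorem last_of_mem_max (out : List Int) (b : Int) (hp : out.Pairwise (· < ·))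
    (hle : ∀ y ∈ out, y ≤ b) (hmem : b ∈ out) : out.getLast? = some b := by
  induction out with
  | nil => cases hmem
  | cons c t ih =>
    rcases List.pairwise_cons.mp hp with ⟨hc, ht⟩
    cases t with
    | nil => simp at hmem; simp [hmem]
    | cons u v =>
      have hbt : b ∈ u :: v := by
        rcases List.mem_cons.mp hmem with h | h
        · exfalso
          have : c < u := hc u (by simp)
          have : u ≤ b := hle u (by simp)
          omega
        · exact h
      rw [List.getLast?_cons_cons]
      exact ih ht (fun y hy => hle y (List.mem_cons_of_mem _ hy)) hbt

-- The B-scan invariant: starting from a strictly increasing accumulator whose elements are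
-- all ≤ the head of the (sorted) remaining list, the scan yields a strictly increasing list
-- whose members are the old accumulator plus the values occurring at least twice.
theorem stepB_invariant (a : Int) (rest : List Int) (out : List Int)
    (hsorted : (a :: rest).Pairwise (· ≤ ·))
    (hout : out.Pairwise (· < ·))
    (hle : ∀ y ∈ out, y ≤ a) :
    (((a :: rest).zip rest).foldl stepB out).Pairwise (· < ·) ∧
    ∀ x : Int, x ∈ ((a :: rest).zip rest).foldl stepB out ↔
      x ∈ out ∨ 2 ≤ (a :: rest).count x := by
  induction rest generalizing a out with
  | nil =>
    refine ⟨by simpa using hout, fun x => ?_⟩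
    simp only [List.zip_nil_right, List.foldl_nil, List.count_cons, List.count_nil]
    constructor
    · exact fun h => Or.inl h
    · rintro (h | h)
      · exact h
      · exfalso; split at h <;> omega
  | cons b t ih =>
    have hab : a ≤ b := (List.pairwise_cons.mp hsorted).1 b (by simp)
    have hsorted' : (b :: t).Pairwise (· ≤ ·) := (List.pairwise_cons.mp hsorted).2
    have hzip : (a :: b :: t).zip (b :: t) = (a, b) :: (b :: t).zip t := rfl
    rw [hzip, List.foldl_cons]
    by_cases hguard : a = b ∧ out.getLast? ≠ some b
    · -- append branch
      have hstep : stepB out (a, b) = out ++ [b] := by simp [stepB, hguard.1, hguard.2]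
      have hbnot : b ∉ out := fun hb => hguard.2 (last_of_mem_max out b hout
        (fun y hy => le_trans (hle y hy) hab) hb)
      have hout' : (out ++ [b]).Pairwise (· < ·) := by
        rw [List.pairwise_append]
        refine ⟨hout, by simp, fun y hy z hz => ?_⟩
        have hzb : z = b := List.mem_singleton.mp hz
        have h1 : y ≤ b := le_trans (hle y hy) hab
        have h2 : y < b := lt_of_le_of_ne h1 (fun h => hbnot (h ▸ hy))
        simpa [hzb] using h2
      have hle' : ∀ y ∈ out ++ [b], y ≤ b := by
        intro y hy
        rcases List.mem_append.mp hy with h | h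
        · exact le_trans (hle y h) hab
        · have := List.mem_singleton.mp h; simp [this]
      obtain ⟨hp, hm⟩ := ih b (out ++ [b]) hsorted' hout' hle'
      rw [hstep]
      refine ⟨hp, fun x => ?_⟩
      rw [hm x]
      obtain ⟨hab2, _⟩ := hguard
      by_cases hx : x = b
      · subst hx
        have h1 : (x :: t).count x = t.count x + 1 := List.count_cons_self
        have h2 : (a :: x :: t).count x = (x :: t).count x + 1 := by
          rw [hab2]; exact List.count_cons_self
        exact iff_of_true (Or.inl (by simp)) (Or.inr (by omega))
      · have hxa : x ≠ a := fun h => hx (h.trans hab2)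
        have e1 : (a :: b :: t).count x = (b :: t).count x :=
          List.count_cons_of_ne (Ne.symm hxa)
        rw [e1]
        simp [hx]
    · -- skip branch
      have hstep : stepB out (a, b) = out := by
        simp only [stepB]
        rw [if_neg hguard]
      have hle2 : ∀ y ∈ out, y ≤ b := fun y hy => le_trans (hle y hy) hab
      obtain ⟨hp, hm⟩ := ih b out hsorted' hout hle2
      rw [hstep]
      refine ⟨hp, fun x => ?_⟩
      rw [hm x]
      by_cases hab' : a = b
      · subst hab'
        -- guard failed with a = b, so out.getLast? = some a, hence a ∈ out
        have hlast : out.getLast? = some a := by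
          by_contra h
          exact hguard ⟨rfl, h⟩
        have hain : a ∈ out := List.mem_of_getLast? hlast
        by_cases hx : x = a
        · subst hx; simp [hain]
        · simp [List.count_cons_of_ne (Ne.symm hx)]
      · -- a < b ≤ every element of b :: t, so a does not occur in b :: t
        have hnotin : a ∉ b :: t := by
          intro hmem
          have : b ≤ a := by
            rcases List.mem_cons.mp hmem with h | h
            · omega
            · exact (List.pairwise_cons.mp hsorted').1 a h
          omega
        by_cases hx : x = a
        · subst hx
          have hz : (b :: t).count x = 0 := List.count_eq_zero.mpr hnotin
          have h1 : (x :: b :: t).count x = (b :: t).count x + 1 := List.count_cons_self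
          constructor
          · rintro (h | h)
            · exact Or.inl h
            · omega
          · rintro (h | h)
            · exact Or.inl h
            · omega
        · simp [List.count_cons_of_ne (Ne.symm hx)]

-- B's scan over the sorted flattened ids equals sorted(A's duplicates set).
theorem main_eq (routes : List (List (String × List Int))) :
    PySem.List.sorted
      (routes.foldl
        (fun (st : PySem.Set Int × PySem.Set Int) route =>
          ((PySem.Dict.get? (PySem.Dict.mk route) "customers").getD []).foldl
            (fun (st : PySem.Set Int × PySem.Set Int) cid =>
              (PySem.Set.add st.1 cid,
               if PySem.Set.contains st.1 cid then PySem.Set.add st.2 cid else st.2)) st)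
        (PySem.Set.empty, PySem.Set.empty)).2 (fun x => x) false =
    (let ids := PySem.List.sorted
        (routes.flatMap (fun route => (PySem.Dict.get? (PySem.Dict.mk route) "customers").getD []))
        (fun x => x) false
     (ids.zip (PySem.List.slice ids (some 1) none)).foldl
       (fun (out : List Int) p =>
         if p.1 = p.2 ∧ out.getLast? ≠ some p.2 then out ++ [p.2] else out) []) := by
  set g : List (String × List Int) → List Int :=
    fun route => (PySem.Dict.get? (PySem.Dict.mk route) "customers").getD [] with hg
  set L := routes.flatMap g with hL
  rw [show (routes.foldl
      (fun (st : PySem.Set Int × PySem.Set Int) route =>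
        (g route).foldl
          (fun (st : PySem.Set Int × PySem.Set Int) cid =>
            (PySem.Set.add st.1 cid,
             if PySem.Set.contains st.1 cid then PySem.Set.add st.2 cid else st.2)) st)
      (PySem.Set.empty, PySem.Set.empty)) =
    routes.foldl (fun st route => (g route).foldl stepA st)
      (PySem.Set.empty, PySem.Set.empty) from rfl]
  rw [foldl_foldl_eq_foldl_flatMap routes g stepA, ← hL]
  obtain ⟨hnd, hmemA⟩ := stepA_invariant L PySem.Set.empty PySem.Set.empty
    (by simp [PySem.Set.empty])
  simp only
  set ids := PySem.List.sorted L (fun x => x) false with hids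
  rw [show ((ids.zip (PySem.List.slice ids (some 1) none)).foldl
      (fun (out : List Int) p =>
        if p.1 = p.2 ∧ out.getLast? ≠ some p.2 then out ++ [p.2] else out) []) =
      (ids.zip (PySem.List.slice ids (some 1) none)).foldl stepB [] from rfl]
  rw [PySem.List.slice_from_one]
  have hperm : ids.Perm L := PySem.List.sorted_perm L (fun x => x) false
  have hcount : ∀ x : Int, ids.count x = L.count x := fun x => hperm.count_eq x
  have hsorted : ids.Pairwise (· ≤ ·) := by
    have := PySem.List.sorted_pairwise L (fun x => x)
    simpa using this
  have hscan : ∀ l : List Int, l.Pairwise (· ≤ ·) →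
      ((l.zip l.tail).foldl stepB []).Pairwise (· < ·) ∧
      ∀ x : Int, x ∈ (l.zip l.tail).foldl stepB [] ↔ 2 ≤ l.count x := by
    intro l hl
    cases l with
    | nil => exact ⟨by simp, fun x => by simp⟩
    | cons a rest =>
      obtain ⟨hp, hm⟩ := stepB_invariant a rest [] hl (by simp) (by simp)
      exact ⟨hp, fun x => by rw [show (a :: rest).tail = rest from rfl, hm x]; simp⟩
  obtain ⟨hBp, hBm⟩ := hscan ids hsorted
  apply PySem.List.sorted_eq_of_perm_of_pairwise_lt
  · have hBnd : ((ids.zip ids.tail).foldl stepB []).Nodup :=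
      hBp.imp (fun h => ne_of_lt h)
    apply (List.perm_ext_iff_of_nodup hBnd hnd).mpr
    intro x
    rw [hBm x, hmemA x, hcount x]
    simp [PySem.Set.empty]
  · simpa using hBp

-- ===== VERDICT (by name: the statement is the Claim_ definition above) =====
theorem duplicate_customers_spec : Claim_equal_duplicate_customers := by
  intro solution _ _
  exact main_eq ((PySem.Dict.get? (PySem.Dict.mk solution) "routes").getD [])
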